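-- pv_equiv track=rewrite | github.com/minsung8/algorithmProblem_Exercise | product_of_array_except_self.py | solution
-- ===== SOURCE A (Python) =====
-- def solution(num):
--
--     answer_list = [1]
--     temp = 1
--     for i in range(len(num)-1):
--         temp *= num[i]
--         answer_list.append(temp)
--
--     num = sorted(num, reverse=True)
--
--     answer_list2 = [1]
--     temp = 1
--     for i in range(len(num)-1):
--         temp *= num[i]
--         answer_list2.append(temp)
--
--     answer = []
--
--     for i in range(len(num)):
--         temp = answer_list[i] * answer_list2[len(num) - i - 1]
--         answer.append(temp)
--
--     return answer
-- ===== SOURCE B (Python) =====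
-- def _prod(xs):
--     p = 1
--     for x in xs:
--         p *= x
--     return p
--
--
-- def solution(num):
--     n = len(num)
--     desc = sorted(num, reverse=True)
--     return [_prod(num[:i]) * _prod(desc[:n - 1 - i]) for i in range(n)]
-- ===== Notes on version B (the rewrite author's own statement) =====
-- stated objective: simpler
-- what changed: Drops the two maintained prefix-product accumulator lists and the final combining loop; a single comprehension recomputes each output directly as the product of a slice of the original list times the product of a slice of the descending-sorted list.
import Mathlib
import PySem

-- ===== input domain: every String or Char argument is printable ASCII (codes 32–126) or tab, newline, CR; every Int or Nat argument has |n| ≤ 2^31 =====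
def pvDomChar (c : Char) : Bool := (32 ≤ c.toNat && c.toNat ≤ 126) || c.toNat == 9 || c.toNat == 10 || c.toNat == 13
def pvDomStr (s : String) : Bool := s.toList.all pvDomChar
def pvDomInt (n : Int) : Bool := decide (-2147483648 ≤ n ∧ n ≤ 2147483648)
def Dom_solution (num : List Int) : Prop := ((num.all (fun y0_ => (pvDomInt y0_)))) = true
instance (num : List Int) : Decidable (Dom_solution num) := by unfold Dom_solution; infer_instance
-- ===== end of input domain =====

-- B replaces A's two maintained prefix-product accumulator lists and combining loop by one
-- comprehension that recomputes each factor as a product over a slice (objective: simpler).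

-- ===== PORT A =====
def solution (num : List Int) : List Int :=
  let st1 := (PySem.List.pyRange 0 (PySem.List.len num - 1)).foldl
    (fun (s : List Int × Int) i =>
      let temp := s.2 * PySem.List.pyGetD num i 1
      (s.1 ++ [temp], temp)) ([1], 1)
  let answer_list := st1.1
  let num2 := PySem.List.sorted num (fun x => x) true
  let st2 := (PySem.List.pyRange 0 (PySem.List.len num2 - 1)).foldl
    (fun (s : List Int × Int) i =>
      let temp := s.2 * PySem.List.pyGetD num2 i 1
      (s.1 ++ [temp], temp)) ([1], 1)
  let answer_list2 := st2.1
  (PySem.List.pyRange 0 (PySem.List.len num2)).foldl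
    (fun (acc : List Int) i =>
      acc ++ [PySem.List.pyGetD answer_list i 1 *
              PySem.List.pyGetD answer_list2 (PySem.List.len num2 - i - 1) 1]) []

-- ===== PORT B =====
def pyprod (xs : List Int) : Int := xs.foldl (fun p x => p * x) 1

def solution_alt (num : List Int) : List Int :=
  let n := PySem.List.len num
  let desc := PySem.List.sorted num (fun x => x) true
  (PySem.List.pyRange 0 n).map (fun i =>
    pyprod (PySem.List.slice num none (some i)) *
    pyprod (PySem.List.slice desc none (some (n - 1 - i))))

-- ===== PRECONDITION & SPEC =====
def Spec_solution (num : List Int) (out : List Int) : Prop := out = solution_alt num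
instance (num : List Int) (out : List Int) : Decidable (Spec_solution num out) := by unfold Spec_solution; infer_instance

-- ===== CLAIM (what is proved, stated in full; the proofs are below) =====
def Claim_equal_solution : Prop := ∀ (num : List Int), Dom_solution num → Spec_solution num (solution num)

-- ===== LEMMAS AND PROOFS =====

lemma pyprod_append (l : List Int) (x : Int) : pyprod (l ++ [x]) = pyprod l * x := by
  simp [pyprod, List.foldl_append]

-- A's accumulator loop over the first m elements builds the list of prefix products.
lemma prefix_loop (xs : List Int) (m : Nat) (h : m ≤ xs.length) :
    (List.range m).foldl (fun (s : List Int × Int) k =>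
        (s.1 ++ [s.2 * xs.getD k 1], s.2 * xs.getD k 1)) ([1], 1)
    = ((List.range (m + 1)).map (fun k => pyprod (xs.take k)), pyprod (xs.take m)) := by
  induction m with
  | zero => simp [pyprod]
  | succ m ih =>
    have hm : m < xs.length := h
    have htake : xs.take (m + 1) = xs.take m ++ [xs[m]] := by
      rw [List.take_add_one, List.getElem?_eq_getElem hm]; rfl
    have hget : xs.getD m 1 = xs[m] := List.getD_eq_getElem _ _ hm
    rw [List.range_succ, List.foldl_append, ih (Nat.le_of_lt hm)]
    simp only [List.foldl_cons, List.foldl_nil, Prod.mk.injEq]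
    constructor
    · rw [List.range_succ (n := m + 1), List.map_append, hget]
      congr 1
      rw [List.map_singleton, htake, pyprod_append]
    · rw [hget, htake, pyprod_append]

-- elements of the built accumulator list
lemma getD_prefix_map (g : Nat → Int) (n k : Nat) (hk : k < n) :
    ((List.range n).map g).getD k 1 = g k := by
  rw [List.getD_eq_getElem _ _ (by simpa using hk)]
  simp

lemma solution_alt_eq (num : List Int) :
    solution_alt num = (List.range num.length).map
      (fun k => pyprod (num.take k) *
        pyprod ((PySem.List.sorted num (fun x => x) true).take (num.length - 1 - k))) := by
  unfold solution_alt
  simp only [PySem.List.len, PySem.List.pyRange_zero_natCast, List.map_map]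
  apply List.map_congr_left
  intro k hk
  have hk' : k < num.length := List.mem_range.mp hk
  have h1 : PySem.List.slice num none (some (k : Int)) = num.take k := by
    rw [PySem.List.slice_to _ (by exact_mod_cast Nat.zero_le k)]; simp
  have h2 : ((num.length : Int) - 1 - (k : Int)) = ((num.length - 1 - k : Nat) : Int) := by omega
  have h3 : PySem.List.slice (PySem.List.sorted num (fun x => x) true) none
      (some ((num.length : Int) - 1 - (k : Int)))
      = (PySem.List.sorted num (fun x => x) true).take (num.length - 1 - k) := by
    rw [h2, PySem.List.slice_to _ (by exact_mod_cast Nat.zero_le _)]; simp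
  simp [h1, h3]

lemma solution_eq (x : Int) (t : List Int) :
    solution (x :: t) = (List.range (x :: t).length).map
      (fun k => pyprod ((x :: t).take k) *
        pyprod ((PySem.List.sorted (x :: t) (fun x => x) true).take ((x :: t).length - 1 - k))) := by
  set num := x :: t with hnum
  set desc := PySem.List.sorted num (fun x => x) true with hdesc
  have hlen : num.length = t.length + 1 := by simp [hnum]
  have hdlen : desc.length = num.length := by
    rw [hdesc]; simp
  unfold solution
  rw [← hdesc]
  have hl1 : PySem.List.len num - 1 = ((t.length : Nat) : Int) := by
    simp [PySem.List.len, hlen]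
  have hl3 : PySem.List.len desc = ((num.length : Nat) : Int) := by
    simp [PySem.List.len, hdlen]
  have hl2 : ((num.length : Nat) : Int) - 1 = ((t.length : Nat) : Int) := by omega
  simp only [hl3, hl1, hl2, PySem.List.pyRange_zero_natCast, List.foldl_map,
    PySem.List.pyGetD_natCast]
  rw [prefix_loop num t.length (by omega), prefix_loop desc t.length (by omega)]
  rw [PySem.List.foldl_append_singleton_eq_map]
  apply List.map_congr_left
  intro k hk
  have hk' : k < num.length := List.mem_range.mp hk
  have hidx : ((num.length : Int) - (k : Int) - 1) = ((num.length - 1 - k : Nat) : Int) := by omega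
  rw [hidx]
  simp only [PySem.List.pyGetD_natCast]
  rw [show t.length + 1 = num.length from hlen.symm]
  rw [getD_prefix_map _ _ _ hk', getD_prefix_map _ _ _ (by omega)]

-- ===== VERDICT (by name: the statement is the Claim_ definition above) =====
theorem solution_spec : Claim_equal_solution := by
  intro num _
  unfold Spec_solution
  cases num with
  | nil => rfl
  | cons x t => rw [solution_eq, solution_alt_eq]
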